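-- pv_equiv track=rewrite | github.com/SeongBeomLEE/CodingTest | Programmers/re_solve/Q9-1.py | solution
-- ===== SOURCE A (Python) =====
-- def solution(n, times):
--     left = 1
--     right = max(times) * n
--     answer = -1
--     while left <= right:
--         mid = (left + right) // 2
--         cnt = 0
--         for time in times:
--             cnt += mid // time
--         if cnt >= n:
--             if answer == -1:
--                 answer = mid
--             else:
--                 answer = min(answer, mid)
--             right = mid - 1
--         else:
--             left = mid + 1
--     return answer
-- ===== SOURCE B (Python) =====
-- def _rank(h):
--     return h[1] if h is not None else 0
--
--
-- def _merge(a, b):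
--     # leftist min-heap merge; nodes are (key, rank, left, right), empty = None
--     if a is None:
--         return b
--     if b is None:
--         return a
--     if b[0] < a[0]:
--         a, b = b, a
--     key, _, left, right = a
--     merged = _merge(right, b)
--     if _rank(left) < _rank(merged):
--         left, merged = merged, left
--     return (key, _rank(merged) + 1, left, merged)
--
--
-- def solution(n, times):
--     # event-driven simulation: each booth's next completion time sits in a
--     # min-heap keyed by (completion, rate); serve people one at a time.
--     heap = None
--     for t in times:
--         heap = _merge(heap, ((t, t), 1, None, None))
--     answer = -1
--     for _ in range(n):
--         (c, r), _, left, right = heap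
--         answer = c
--         heap = _merge(_merge(left, right), ((c + r, r), 1, None, None))
--     return answer
-- ===== Notes on version B (the rewrite author's own statement) =====
-- stated objective: alternative
-- what changed: Replaces the binary search over the answer with an event-driven simulation: a hand-rolled leftist min-heap holds each booth's next completion time (keyed by (completion, rate)); n people are served by popping the earliest completion and pushing completion+rate back, and the n-th popped completion is the answer - no midpoint, no count predicate.
-- outside the precondition, e.g. on solution(2, [-3]): A returns -1, B returns -6
import Mathlib
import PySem

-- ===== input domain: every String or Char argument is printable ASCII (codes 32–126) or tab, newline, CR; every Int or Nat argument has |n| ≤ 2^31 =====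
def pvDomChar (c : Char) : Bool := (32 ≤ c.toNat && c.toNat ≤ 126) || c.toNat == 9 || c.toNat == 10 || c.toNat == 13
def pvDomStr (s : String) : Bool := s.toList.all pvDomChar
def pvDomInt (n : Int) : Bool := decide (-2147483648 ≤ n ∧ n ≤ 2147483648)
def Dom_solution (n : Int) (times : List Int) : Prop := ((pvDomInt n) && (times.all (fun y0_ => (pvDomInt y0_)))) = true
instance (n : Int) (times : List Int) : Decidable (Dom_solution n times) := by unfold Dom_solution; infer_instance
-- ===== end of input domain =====

-- B replaces A's binary search over the answer by an event-driven simulation on a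
-- hand-rolled leftist min-heap of per-booth next completion times (objective: alternative).

-- ===== PORT A =====
-- mid = (left + right) // 2
def midOf (left right : Int) : Int := PySem.Int.floordiv (left + right) 2

-- the for loop: cnt = 0; for time in times: cnt += mid // time
def cntOf (times : List Int) (mid : Int) : Int :=
  times.foldl (fun c time => c + PySem.Int.floordiv mid time) 0

-- the while loop of A: left/right/answer state
def solLoopA (n : Int) (times : List Int) (left right answer : Int) : Int :=
  if h : left ≤ right then
    if n ≤ cntOf times (midOf left right) then
      solLoopA n times left (midOf left right - 1)
        (if answer = -1 then midOf left right else min answer (midOf left right))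
    else
      solLoopA n times (midOf left right + 1) right answer
  else answer
termination_by (right + 1 - left).toNat
decreasing_by
  · have := PySem.Int.floordiv_two_mid_bounds h; unfold midOf; omega
  · have := PySem.Int.floordiv_two_mid_bounds h; unfold midOf; omega

def solution (n : Int) (times : List Int) : Int :=
  let right := (PySem.List.max? times (fun y => y)).getD 0 * n  -- max(times); [] raises, excluded by Pre_
  solLoopA n times 1 right (-1)

-- ===== PORT B =====
-- B's heap nodes are Python tuples (key, rank, left, right); empty heap = None
inductive LHeap where
  | nil : LHeap
  | node : (Int × Int) → Int → LHeap → LHeap → LHeap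
deriving DecidableEq, Repr

-- Python tuple comparison (c1, r1) < (c2, r2)
def tupLt (a b : Int × Int) : Bool := a.1 < b.1 || (a.1 == b.1 && a.2 < b.2)

-- _rank(h)
def hrank : LHeap → Int
  | LHeap.nil => 0
  | LHeap.node _ s _ _ => s

-- _merge(a, b), the leftist-heap merge of Source B, step for step
def hmerge : LHeap → LHeap → LHeap
  | LHeap.nil, b => b
  | LHeap.node ka sa la ra, LHeap.nil => LHeap.node ka sa la ra
  | LHeap.node ka sa la ra, LHeap.node kb sb lb rb =>
      if tupLt kb ka then
        -- a, b = b, a : continue with a := (kb, sb, lb, rb)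
        let merged := hmerge rb (LHeap.node ka sa la ra)
        if hrank lb < hrank merged then LHeap.node kb (hrank lb + 1) merged lb
        else LHeap.node kb (hrank merged + 1) lb merged
      else
        let merged := hmerge ra (LHeap.node kb sb lb rb)
        if hrank la < hrank merged then LHeap.node ka (hrank la + 1) merged la
        else LHeap.node ka (hrank merged + 1) la merged
termination_by a b => sizeOf a + sizeOf b
decreasing_by
  all_goals first
    | omega
    | (simp; omega)
    | simp

-- heap = None; for t in times: heap = _merge(heap, ((t, t), 1, None, None))
def buildHeap (times : List Int) : LHeap :=
  times.foldl (fun h t => hmerge h (LHeap.node (t, t) 1 LHeap.nil LHeap.nil)) LHeap.nil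

-- for _ in range(n): pop the root, push back (c + r, r); answer = popped c.
-- (Python unpacks the root and raises on an empty heap; LHeap.nil is excluded by Pre_.)
def popLoop : Nat → LHeap → Int → Int
  | 0, _, ans => ans
  | _ + 1, LHeap.nil, ans => ans
  | k + 1, LHeap.node (c, r) _ l rr, _ =>
      popLoop k (hmerge (hmerge l rr) (LHeap.node (c + r, r) 1 LHeap.nil LHeap.nil)) c

def solution_alt (n : Int) (times : List Int) : Int :=
  popLoop n.toNat (buildHeap times) (-1)

-- ===== PRECONDITION & SPEC =====
-- Pre_ admits the problem's natural domain — a nonempty list of positive booth times with any n —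
-- and, in addition, any nonempty times when n ≤ 0 and max(times) ≥ 0 (A's search range [1, max*n]
-- is empty, it returns -1 without dividing, and B serves nobody).  Excluded: empty times (A raises
-- ValueError at max), and lists with a nonpositive entry otherwise: a 0 entry makes A raise
-- ZeroDivisionError once its loop runs, and on negative (meaningless) booth times A's bisection
-- value is an artifact of its probe path.
def Pre_solution (n : Int) (times : List Int) : Prop :=
  times ≠ [] ∧ ((∀ x ∈ times, 1 ≤ x) ∨ (n ≤ 0 ∧ 0 ≤ (PySem.List.max? times (fun y => y)).getD 0))
instance (n : Int) (times : List Int) : Decidable (Pre_solution n times) := by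
  unfold Pre_solution; infer_instance

def pvWitness_solution : Int × List Int := (6, [7, 10])

def Spec_solution (n : Int) (times : List Int) (out : Int) : Prop := out = solution_alt n times
instance (n : Int) (times : List Int) (out : Int) : Decidable (Spec_solution n times out) := by
  unfold Spec_solution; infer_instance

-- ===== CLAIM (what is proved, stated in full; the proofs are below) =====
def Claim_equal_solution : Prop := ∀ (n : Int) (times : List Int), Dom_solution n times → Pre_solution n times → Spec_solution n times (solution n times)

-- ===== LEMMAS AND PROOFS =====

-- served t = Python's cnt at probe t: sum of t // x
def served (times : List Int) (t : Int) : Int :=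
  (times.map (fun x => PySem.Int.floordiv t x)).sum

-- non-strict tuple order: ¬ (b < a)
def tLe (a b : Int × Int) : Prop := a.1 < b.1 ∨ (a.1 = b.1 ∧ a.2 ≤ b.2)

theorem tLe_refl (a : Int × Int) : tLe a a := Or.inr ⟨rfl, le_refl _⟩

theorem tLe_trans {a b c : Int × Int} (h1 : tLe a b) (h2 : tLe b c) : tLe a c := by
  unfold tLe at *; rcases h1 with h1 | ⟨h1, h1'⟩ <;> rcases h2 with h2 | ⟨h2, h2'⟩ <;>
    [left; left; left; right] <;> omega

theorem tLe_of_not_tupLt {a b : Int × Int} (h : ¬ tupLt b a) : tLe a b := by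
  unfold tupLt at h; unfold tLe
  simp only [Bool.or_eq_true, Bool.and_eq_true, decide_eq_true_eq, beq_iff_eq, not_or, not_and] at h
  omega

theorem tLe_of_tupLt {a b : Int × Int} (h : tupLt a b) : tLe a b := by
  unfold tupLt at h; unfold tLe
  simp only [Bool.or_eq_true, Bool.and_eq_true, decide_eq_true_eq, beq_iff_eq] at h
  omega

-- keys of a heap, as a multiset
def hkeys : LHeap → Multiset (Int × Int)
  | LHeap.nil => 0
  | LHeap.node k _ l r => k ::ₘ (hkeys l + hkeys r)

-- min-heap property w.r.t. tLe
def IsHeapT : LHeap → Prop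
  | LHeap.nil => True
  | LHeap.node k _ l r =>
      (∀ q ∈ hkeys l, tLe k q) ∧ (∀ q ∈ hkeys r, tLe k q) ∧ IsHeapT l ∧ IsHeapT r

theorem root_le {k : Int × Int} {s : Int} {l r : LHeap}
    (h : IsHeapT (LHeap.node k s l r)) : ∀ q ∈ hkeys (LHeap.node k s l r), tLe k q := by
  intro q hq
  simp only [hkeys, Multiset.mem_cons, Multiset.mem_add] at hq
  rcases hq with rfl | hq | hq
  · exact tLe_refl q
  · exact h.1 q hq
  · exact h.2.1 q hq

theorem tLe_fst {a b : Int × Int} (h : tLe a b) : a.1 ≤ b.1 := by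
  rcases h with h | ⟨h, _⟩ <;> omega

theorem hkeys_hmerge : ∀ (a b : LHeap), hkeys (hmerge a b) = hkeys a + hkeys b
  | LHeap.nil, b => by simp [hmerge, hkeys]
  | LHeap.node ka sa la ra, LHeap.nil => by simp [hmerge, hkeys]
  | LHeap.node ka sa la ra, LHeap.node kb sb lb rb => by
      by_cases hlt : tupLt kb ka
      · have ih := hkeys_hmerge rb (LHeap.node ka sa la ra)
        rw [hmerge, if_pos hlt]
        dsimp only
        split_ifs <;>
          simp only [hkeys, ih, ← Multiset.singleton_add, add_assoc, add_left_comm, add_comm]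
      · have ih := hkeys_hmerge ra (LHeap.node kb sb lb rb)
        rw [hmerge, if_neg hlt]
        dsimp only
        split_ifs <;>
          simp only [hkeys, ih, ← Multiset.singleton_add, add_assoc, add_left_comm, add_comm]
termination_by a b => sizeOf a + sizeOf b
decreasing_by
  all_goals first
    | omega
    | (simp; omega)
    | simp

theorem isHeapT_hmerge : ∀ (a b : LHeap), IsHeapT a → IsHeapT b → IsHeapT (hmerge a b)
  | LHeap.nil, b => by intro _ hb; simpa [hmerge]
  | LHeap.node ka sa la ra, LHeap.nil => by intro ha _; simpa [hmerge]
  | LHeap.node ka sa la ra, LHeap.node kb sb lb rb => by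
      intro ha hb
      by_cases hlt : tupLt kb ka
      · obtain ⟨hbl, hbr, hlbH, hrbH⟩ := hb
        have hkk : tLe kb ka := tLe_of_tupLt hlt
        have hmergedH : IsHeapT (hmerge rb (LHeap.node ka sa la ra)) :=
          isHeapT_hmerge rb (LHeap.node ka sa la ra) hrbH ha
        have hmergedLe : ∀ q ∈ hkeys (hmerge rb (LHeap.node ka sa la ra)), tLe kb q := by
          intro q hq
          rw [hkeys_hmerge] at hq
          rcases Multiset.mem_add.mp hq with hq | hq
          · exact hbr q hq
          · exact tLe_trans hkk (root_le ha q hq)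
        rw [hmerge, if_pos hlt]
        dsimp only
        split_ifs
        · exact ⟨hmergedLe, hbl, hmergedH, hlbH⟩
        · exact ⟨hbl, hmergedLe, hlbH, hmergedH⟩
      · obtain ⟨hal, har, hlaH, hraH⟩ := ha
        have hkk : tLe ka kb := tLe_of_not_tupLt hlt
        have hmergedH : IsHeapT (hmerge ra (LHeap.node kb sb lb rb)) :=
          isHeapT_hmerge ra (LHeap.node kb sb lb rb) hraH hb
        have hmergedLe : ∀ q ∈ hkeys (hmerge ra (LHeap.node kb sb lb rb)), tLe ka q := by
          intro q hq
          rw [hkeys_hmerge] at hq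
          rcases Multiset.mem_add.mp hq with hq | hq
          · exact har q hq
          · exact tLe_trans hkk (root_le hb q hq)
        rw [hmerge, if_neg hlt]
        dsimp only
        split_ifs
        · exact ⟨hmergedLe, hal, hmergedH, hlaH⟩
        · exact ⟨hal, hmergedLe, hlaH, hmergedH⟩
termination_by a b => sizeOf a + sizeOf b
decreasing_by
  all_goals first
    | omega
    | (simp; omega)
    | simp

theorem isHeapT_single (x : Int × Int) : IsHeapT (LHeap.node x 1 LHeap.nil LHeap.nil) := by
  refine ⟨?_, ?_, trivial, trivial⟩ <;> intro q hq <;> simp [hkeys] at hq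

theorem buildHeap_aux : ∀ (ts : List Int) (acc : LHeap),
    hkeys (ts.foldl (fun h t => hmerge h (LHeap.node (t, t) 1 LHeap.nil LHeap.nil)) acc)
      = hkeys acc + ↑(ts.map fun t => (t, t)) ∧
    (IsHeapT acc → IsHeapT (ts.foldl (fun h t => hmerge h (LHeap.node (t, t) 1 LHeap.nil LHeap.nil)) acc)) := by
  intro ts
  induction ts with
  | nil => intro acc; simp
  | cons t tl ih =>
    intro acc
    obtain ⟨ihk, ihh⟩ := ih (hmerge acc (LHeap.node (t, t) 1 LHeap.nil LHeap.nil))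
    constructor
    · rw [List.foldl_cons, ihk, hkeys_hmerge]
      simp only [hkeys, List.map_cons, ← Multiset.cons_coe, ← Multiset.singleton_add,
        add_zero, zero_add, add_assoc, add_comm]
    · intro hacc
      rw [List.foldl_cons]
      exact ihh (isHeapT_hmerge acc _ hacc (isHeapT_single (t, t)))

theorem hkeys_buildHeap (times : List Int) :
    hkeys (buildHeap times) = ↑(times.map (fun t => (t, t))) ∧ IsHeapT (buildHeap times) := by
  obtain ⟨hk, hh⟩ := buildHeap_aux times LHeap.nil
  exact ⟨by simpa [hkeys] using hk, hh trivial⟩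

-- small list facts used by the invariant bookkeeping
theorem sum_set_int : ∀ (cnt : List Nat) (i : Nat) (hi : i < cnt.length) (v : Nat),
    (((cnt.set i v).sum : Nat) : Int) = (cnt.sum : Int) - ((cnt[i]'hi : Nat) : Int) + (v : Int) := by
  intro cnt
  induction cnt with
  | nil => intro i hi; simp at hi
  | cons a tl ih =>
    intro i hi v
    cases i with
    | zero => simp [List.set]; ring
    | succ j =>
      have hj : j < tl.length := by simpa using hi
      simp only [List.set_cons_succ, List.sum_cons, List.getElem_cons_succ]
      push_cast [ih j hj v]
      ring

theorem cons_set_perm {α : Type} : ∀ (L : List α) (i : Nat) (hi : i < L.length) (x : α),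
    (L[i]'hi) ::ₘ (↑(L.set i x) : Multiset α) = x ::ₘ ↑L := by
  intro L
  induction L with
  | nil => intro i hi; simp at hi
  | cons a tl ih =>
    intro i hi x
    cases i with
    | zero =>
      simp only [List.getElem_cons_zero, List.set_cons_zero, ← Multiset.cons_coe]
      exact Multiset.cons_swap a x ↑tl
    | succ j =>
      have hj : j < tl.length := by simpa using hi
      simp only [List.getElem_cons_succ, List.set_cons_succ, ← Multiset.cons_coe]
      rw [Multiset.cons_swap, ih j hj x, Multiset.cons_swap]

theorem zipWith_set (f : Int → Nat → Int × Int) :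
    ∀ (ts : List Int) (cnt : List Nat) (i : Nat) (v : Nat) (hi : i < ts.length),
      i < cnt.length →
      List.zipWith f ts (cnt.set i v) = (List.zipWith f ts cnt).set i (f (ts[i]'hi) v) := by
  intro ts
  induction ts with
  | nil => intro cnt i v hi; simp at hi
  | cons t tl ih =>
    intro cnt i v hi hi'
    cases cnt with
    | nil => simp at hi'
    | cons c ctl =>
      cases i with
      | zero => simp
      | succ j =>
        have hj : j < tl.length := by simpa using hi
        have hj' : j < ctl.length := by simpa using hi'
        simp [ih ctl j v hj hj']

-- the simulation invariant after `done` pops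
def InvS (times : List Int) (h : LHeap) (ans : Int) (done : Nat) : Prop :=
  ∃ cnt : List Nat, cnt.length = times.length ∧
    hkeys h = ↑(List.zipWith (fun t (c : Nat) => (t * ((c : Int) + 1), t)) times cnt) ∧
    cnt.sum = done ∧
    IsHeapT h ∧
    (∀ q ∈ hkeys h, ans ≤ q.1) ∧
    (∀ j (hj : j < times.length) (hj' : j < cnt.length),
        1 ≤ cnt[j] → times[j] * (cnt[j] : Int) ≤ ans) ∧
    (1 ≤ done → ∃ i, ∃ (hi : i < times.length) (hi' : i < cnt.length),
        1 ≤ cnt[i] ∧ ans = times[i] * (cnt[i] : Int))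

theorem zipWith_replicate_zero :
    ∀ (ts : List Int), List.zipWith (fun t (c : Nat) => (t * ((c : Int) + 1), t)) ts
        (List.replicate ts.length 0) = ts.map (fun t => (t, t)) := by
  intro ts
  induction ts with
  | nil => simp
  | cons t tl ih => simp [List.replicate_succ, ih]

theorem invS_init (times : List Int) (hpos : ∀ x ∈ times, 1 ≤ x) :
    InvS times (buildHeap times) (-1) 0 := by
  obtain ⟨hk, hh⟩ := hkeys_buildHeap times
  refine ⟨List.replicate times.length 0, by simp, ?_, by simp, hh, ?_, ?_, by omega⟩
  · rw [hk, zipWith_replicate_zero]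
  · intro q hq
    rw [hk] at hq
    obtain ⟨t, ht, rfl⟩ := List.mem_map.mp (Multiset.mem_coe.mp hq)
    have := hpos t ht
    simp; omega
  · intro j hj hj' h1
    simp [List.getElem_replicate] at h1

theorem invS_step (times : List Int) (hpos : ∀ x ∈ times, 1 ≤ x) (hne : times ≠ [])
    {h : LHeap} {ans : Int} {done : Nat} (hinv : InvS times h ans done) :
    ∃ c r s l rr, h = LHeap.node (c, r) s l rr ∧
      InvS times (hmerge (hmerge l rr) (LHeap.node (c + r, r) 1 LHeap.nil LHeap.nil)) c (done + 1) := by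
  classical
  obtain ⟨cnt, hlen, hk, hsum, hheap, hub, hlb, _⟩ := hinv
  set f : Int → Nat → Int × Int := fun t (c : Nat) => (t * ((c : Int) + 1), t) with hf
  set Z : List (Int × Int) := List.zipWith f times cnt with hZ
  have hZlen : Z.length = times.length := by simp [hZ, List.length_zipWith, hlen]
  -- the heap is nonempty
  cases h with
  | nil =>
    exfalso
    have : (↑Z : Multiset (Int × Int)) = 0 := by rw [← hk]; rfl
    have hZnil : Z = [] := by simpa using this
    have : times.length = 0 := by rw [← hZlen, hZnil]; rfl
    exact hne (List.eq_nil_of_length_eq_zero this)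
  | node k s l rr =>
    obtain ⟨c, r⟩ := k
    refine ⟨c, r, s, l, rr, rfl, ?_⟩
    have hroot : (c, r) ∈ hkeys (LHeap.node (c, r) s l rr) := by simp [hkeys]
    have hmemZ : (c, r) ∈ Z := by
      rw [hk] at hroot; exact Multiset.mem_coe.mp hroot
    obtain ⟨i, hiZ, hget⟩ := List.mem_iff_getElem.mp hmemZ
    have hit : i < times.length := by omega
    have hic : i < cnt.length := by omega
    have hZi : Z[i]'hiZ = (times[i]'hit * ((cnt[i]'hic : Nat) : Int) + times[i]'hit, times[i]'hit) := by
      simp [hZ, hf, List.getElem_zipWith]; ring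
    have hc : c = times[i]'hit * ((cnt[i]'hic : Nat) : Int) + times[i]'hit := by
      rw [hZi] at hget; exact (Prod.mk.injEq _ _ _ _).mp hget |>.1.symm
    have hr : r = times[i]'hit := by
      rw [hZi] at hget; exact (Prod.mk.injEq _ _ _ _).mp hget |>.2.symm
    have hti : 1 ≤ times[i]'hit := hpos _ (List.getElem_mem hit)
    have hansc : ∀ q ∈ hkeys (LHeap.node (c, r) s l rr), c ≤ q.1 := by
      intro q hq; exact tLe_fst (root_le hheap q hq)
    have hSsub : ∀ q ∈ hkeys l + hkeys rr, q ∈ hkeys (LHeap.node (c, r) s l rr) := by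
      intro q hq; simp [hkeys]; right; simpa using Multiset.mem_add.mp hq
    -- the new count vector
    refine ⟨cnt.set i (cnt[i]'hic + 1), by simpa using hlen, ?_, ?_, ?_, ?_, ?_, ?_⟩
    · -- keys of the new heap
      have hset : List.zipWith f times (cnt.set i (cnt[i]'hic + 1))
          = Z.set i (f (times[i]'hit) (cnt[i]'hic + 1)) := zipWith_set f times cnt i _ hit hic
      have hperm := cons_set_perm Z i hiZ (f (times[i]'hit) (cnt[i]'hic + 1))
      rw [hget] at hperm
      have hfx : f (times[i]'hit) (cnt[i]'hic + 1) = (c + r, r) := by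
        simp [hf, hc, hr]; ring
      rw [hfx] at hperm
      -- hperm : (c, r) ::ₘ ↑(Z.set i (c+r, r)) = (c+r, r) ::ₘ ↑Z
      have hkeysnew : hkeys (hmerge (hmerge l rr) (LHeap.node (c + r, r) 1 LHeap.nil LHeap.nil))
          = (c + r, r) ::ₘ (hkeys l + hkeys rr) := by
        rw [hkeys_hmerge, hkeys_hmerge]
        simp only [hkeys, add_zero]
        rw [add_comm, Multiset.cons_add, zero_add]
      rw [hkeysnew, hset, hfx]
      have hold : (↑Z : Multiset (Int × Int)) = (c, r) ::ₘ (hkeys l + hkeys rr) := by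
        rw [← hk]; rfl
      have : (c, r) ::ₘ (↑(Z.set i (c + r, r)) : Multiset (Int × Int))
          = (c, r) ::ₘ ((c + r, r) ::ₘ (hkeys l + hkeys rr)) := by
        rw [hperm, hold, Multiset.cons_swap]
      exact (Multiset.cons_inj_right _).mp this |>.symm
    · -- sum
      have := sum_set_int cnt i hic (cnt[i]'hic + 1)
      have hsums : ((cnt.set i (cnt[i]'hic + 1)).sum : Int) = (done : Int) + 1 := by
        rw [this, hsum]; push_cast; ring
      exact_mod_cast hsums
    · -- heap property
      simp only [IsHeapT] at hheap
      exact isHeapT_hmerge _ _ (isHeapT_hmerge l rr hheap.2.2.1 hheap.2.2.2) (isHeapT_single _)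
    · -- new answer lower-bounds all new keys
      intro q hq
      rw [hkeys_hmerge, hkeys_hmerge] at hq
      simp only [hkeys, Multiset.mem_add, Multiset.mem_cons, Multiset.notMem_zero] at hq
      rcases hq with (hq | hq) | (rfl | hq)
      · exact hansc q (hSsub q (Multiset.mem_add.mpr (Or.inl hq)))
      · exact hansc q (hSsub q (Multiset.mem_add.mpr (Or.inr hq)))
      · simp; omega
      · simp at hq
    · -- per-machine lower bound on the answer
      intro j hj hj' h1
      by_cases hji : j = i
      · subst hji
        simp only [List.getElem_set_self] at h1 ⊢
        rw [hc]; push_cast; ring_nf; omega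
      · have hji' : ¬ i = j := fun hh => hji hh.symm
        simp only [List.getElem_set_ne hji'] at h1 ⊢
        have hjc : j < cnt.length := by simpa using hj'
        have := hlb j hj hjc h1
        have hac : ans ≤ c := hub (c, r) hroot
        omega
    · -- the popped machine witnesses the answer
      intro _
      refine ⟨i, hit, by simpa using hic, ?_, ?_⟩
      · simp only [List.getElem_set_self]; omega
      · simp only [List.getElem_set_self]; rw [hc]; push_cast; ring

theorem popLoop_inv (times : List Int) (hpos : ∀ x ∈ times, 1 ≤ x) (hne : times ≠ []) :
    ∀ (k : Nat) (h : LHeap) (ans : Int) (done : Nat), InvS times h ans done →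
      ∃ h2, InvS times h2 (popLoop k h ans) (done + k) := by
  intro k
  induction k with
  | zero => intro h ans done hi; exact ⟨h, by simpa using hi⟩
  | succ m ih =>
    intro h ans done hi
    obtain ⟨c, r, s, l, rr, rfl, hstep⟩ := invS_step times hpos hne hi
    obtain ⟨h2, hh2⟩ := ih _ c (done + 1) hstep
    exact ⟨h2, by simpa [popLoop, Nat.add_comm, Nat.add_assoc, Nat.add_left_comm] using hh2⟩

-- extraction: the answer after done ≥ 1 pops brackets `served`
theorem served_ge_of (v : Int) : ∀ (ts : List Int) (cnt : List Nat), ts.length = cnt.length →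
    (∀ (j : Nat) (hj : j < ts.length) (hj' : j < cnt.length),
      ((cnt[j]'hj' : Nat) : Int) ≤ PySem.Int.floordiv v (ts[j]'hj)) →
    ((cnt.sum : Nat) : Int) ≤ served ts v := by
  intro ts
  induction ts with
  | nil =>
    intro cnt hlen _
    cases cnt with
    | nil => simp [served]
    | cons c ctl => simp at hlen
  | cons t tl ih =>
    intro cnt hlen hpt
    cases cnt with
    | nil => simp at hlen
    | cons c ctl =>
      have h0 : ((c : Nat) : Int) ≤ PySem.Int.floordiv v t := by
        simpa using hpt 0 (by simp) (by simp)
      have htl := ih ctl (by simpa using hlen) (fun j hj hj' => by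
        simpa using hpt (j + 1) (by simpa using Nat.succ_lt_succ hj)
          (by simpa using Nat.succ_lt_succ hj'))
      simp only [served, List.map_cons, List.sum_cons] at htl ⊢
      push_cast at htl ⊢
      omega

theorem served_le_of (v : Int) : ∀ (ts : List Int) (cnt : List Nat), ts.length = cnt.length →
    (∀ (j : Nat) (hj : j < ts.length) (hj' : j < cnt.length),
      PySem.Int.floordiv v (ts[j]'hj) ≤ ((cnt[j]'hj' : Nat) : Int)) →
    served ts v ≤ ((cnt.sum : Nat) : Int) := by
  intro ts
  induction ts with
  | nil =>
    intro cnt hlen _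
    cases cnt with
    | nil => simp [served]
    | cons c ctl => simp at hlen
  | cons t tl ih =>
    intro cnt hlen hpt
    cases cnt with
    | nil => simp at hlen
    | cons c ctl =>
      have h0 : PySem.Int.floordiv v t ≤ ((c : Nat) : Int) := by
        simpa using hpt 0 (by simp) (by simp)
      have htl := ih ctl (by simpa using hlen) (fun j hj hj' => by
        simpa using hpt (j + 1) (by simpa using Nat.succ_lt_succ hj)
          (by simpa using Nat.succ_lt_succ hj'))
      simp only [served, List.map_cons, List.sum_cons] at htl ⊢
      push_cast at htl ⊢
      omega

theorem invS_extract (times : List Int) (hpos : ∀ x ∈ times, 1 ≤ x)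
    {h : LHeap} {ans : Int} {done : Nat} (hinv : InvS times h ans done) (hd : 1 ≤ done) :
    (done : Int) ≤ served times ans ∧ served times (ans - 1) < (done : Int) ∧ 1 ≤ ans := by
  obtain ⟨cnt, hlen, hk, hsum, _hheap, hub, hlb, hwit⟩ := hinv
  obtain ⟨i, hit, hic, hci1, hansi⟩ := hwit hd
  have hti : 1 ≤ times[i]'hit := hpos _ (List.getElem_mem hit)
  have hans1 : 1 ≤ ans := by
    rw [hansi]
    have : (1 : Int) * 1 ≤ (times[i]'hit) * ((cnt[i]'hic : Nat) : Int) :=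
      mul_le_mul (by omega) (by exact_mod_cast hci1) (by norm_num) (by omega)
    omega
  -- every machine's pending completion time is at least the last answer
  have hpend : ∀ (j : Nat) (hj : j < times.length) (hj' : j < cnt.length),
      ans ≤ times[j]'hj * ((cnt[j]'hj' : Nat) : Int) + times[j]'hj := by
    intro j hj hj'
    have hmem : (times[j]'hj * ((cnt[j]'hj' : Nat) : Int) + times[j]'hj, times[j]'hj)
        ∈ hkeys h := by
      rw [hk]
      refine Multiset.mem_coe.mpr (List.mem_iff_getElem.mpr
        ⟨j, by simp [List.length_zipWith]; omega, ?_⟩)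
      simp [List.getElem_zipWith]; ring
    simpa using hub _ hmem
  refine ⟨?_, ?_, hans1⟩
  · -- done ≤ served ans
    rw [← hsum]
    apply served_ge_of ans times cnt hlen.symm
    intro j hj hj'
    have htj : 1 ≤ times[j]'hj := hpos _ (List.getElem_mem hj)
    rw [PySem.Int.floordiv_eq_ediv_of_pos (by omega)]
    by_cases h0 : cnt[j]'hj' = 0
    · rw [h0]
      simpa using Int.ediv_nonneg (by omega) (by omega)
    · have hb := hlb j hj hj' (by omega)
      rw [Int.le_ediv_iff_mul_le (by omega), mul_comm]
      exact hb
  · -- served (ans - 1) < done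
    have hstep : served times (ans - 1) ≤ (((cnt.set i (cnt[i]'hic - 1)).sum : Nat) : Int) := by
      apply served_le_of (ans - 1) times _ (by simpa using hlen.symm)
      intro j hj hj'
      have htj : 1 ≤ times[j]'hj := hpos _ (List.getElem_mem hj)
      have hjc : j < cnt.length := by simpa using hj'
      rw [PySem.Int.floordiv_eq_ediv_of_pos (by omega)]
      by_cases hji : j = i
      · subst hji
        have hlt2 : (ans - 1) / (times[j]'hj) < ((cnt[j]'hjc : Nat) : Int) := by
          rw [Int.ediv_lt_iff_lt_mul (by omega), mul_comm]
          omega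
        simp only [List.getElem_set_self]
        push_cast [Nat.cast_sub hci1]
        omega
      · have hji' : ¬ i = j := fun hh => hji hh.symm
        have hlt2 : (ans - 1) / (times[j]'hj) < ((cnt[j]'hjc : Nat) : Int) + 1 := by
          rw [Int.ediv_lt_iff_lt_mul (by omega), add_mul, one_mul, mul_comm]
          have := hpend j hj hjc
          omega
        simp only [List.getElem_set_ne hji']
        omega
    have hsum2 := sum_set_int cnt i hic (cnt[i]'hic - 1)
    omega

-- A's running count equals served
theorem foldl_served (times : List Int) (mid : Int) :
    ∀ c : Int, times.foldl (fun c time => c + PySem.Int.floordiv mid time) c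
      = c + served times mid := by
  induction times with
  | nil => intro c; simp [served]
  | cons x xs ih =>
    intro c
    simp only [List.foldl_cons, ih, served, List.map_cons, List.sum_cons]
    ring

theorem served_mono (times : List Int) (hpos : ∀ x ∈ times, 1 ≤ x) {a b : Int} (hab : a ≤ b) :
    served times a ≤ served times b := by
  induction times with
  | nil => simp [served]
  | cons x xs ih =>
    have hx : 1 ≤ x := hpos x (by simp)
    have hxs : ∀ y ∈ xs, 1 ≤ y := fun y hy => hpos y (by simp [hy])
    have h1 : PySem.Int.floordiv a x ≤ PySem.Int.floordiv b x := by
      rw [PySem.Int.floordiv_eq_ediv_of_pos (by omega),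
          PySem.Int.floordiv_eq_ediv_of_pos (by omega)]
      exact Int.ediv_le_ediv (by omega) hab
    have := ih hxs
    simp [served] at *
    omega

-- strict comparison through monotonicity
theorem lt_of_served (times : List Int) (hpos : ∀ x ∈ times, 1 ≤ x) {n a b : Int}
    (ha : served times a < n) (hb : n ≤ served times b) : a < b := by
  by_contra hc
  have := served_mono times hpos (show b ≤ a by omega)
  omega

-- at t = max(times) * n the count reaches n
theorem served_hi (times : List Int) (hpos : ∀ x ∈ times, 1 ≤ x) {n mx : Int}
    (hn : 1 ≤ n) (hmem : mx ∈ times) :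
    n ≤ served times (mx * n) := by
  have hmx : 1 ≤ mx := hpos mx hmem
  have hhi : 0 ≤ mx * n := by positivity
  have hterm : PySem.Int.floordiv (mx * n) mx = n := by
    rw [PySem.Int.floordiv_eq_ediv_of_pos (by omega)]
    rw [mul_comm]
    exact Int.mul_ediv_cancel n (by omega)
  have hmem' : PySem.Int.floordiv (mx * n) mx ∈ times.map (fun x => PySem.Int.floordiv (mx * n) x) :=
    List.mem_map.mpr ⟨mx, hmem, rfl⟩
  have hnonneg : ∀ y ∈ times.map (fun x => PySem.Int.floordiv (mx * n) x), 0 ≤ y := by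
    intro y hy
    obtain ⟨x, hx, rfl⟩ := List.mem_map.mp hy
    have hx1 : 1 ≤ x := hpos x hx
    rw [PySem.Int.floordiv_eq_ediv_of_pos (by omega)]
    exact Int.ediv_nonneg hhi (by omega)
  have := List.single_le_sum hnonneg _ hmem'
  unfold served
  omega

-- A's loop returns T whenever the binary-search invariant holds
theorem loopA_eq (n : Int) (times : List Int) (hpos : ∀ x ∈ times, 1 ≤ x) (T : Int)
    (hT1 : n ≤ served times T) (hT0 : served times (T - 1) < n) :
    ∀ (k : Nat) (left right answer : Int), (right + 1 - left).toNat ≤ k →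
      left ≤ T → T ≤ right + 1 →
      ((answer = -1 ∧ T ≤ right) ∨ (answer = right + 1 ∧ n ≤ served times answer)) →
      solLoopA n times left right answer = T := by
  intro k
  induction k with
  | zero =>
    intro left right answer hk hl hr hinv
    have hlr : ¬ left ≤ right := by omega
    rw [solLoopA, dif_neg hlr]
    rcases hinv with ⟨_, hTr⟩ | ⟨ha, _⟩
    · omega
    · omega
  | succ m ih =>
    intro left right answer hk hl hr hinv
    rw [solLoopA]
    by_cases hlr : left ≤ right
    · rw [dif_pos hlr]
      have hm := PySem.Int.floordiv_two_mid_bounds hlr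
      have hm' : left ≤ midOf left right ∧ midOf left right ≤ right := hm
      have hcnt : cntOf times (midOf left right) = served times (midOf left right) := by
        unfold cntOf
        have := foldl_served times (midOf left right) 0
        omega
      rw [hcnt]
      by_cases hge : n ≤ served times (midOf left right)
      · rw [if_pos hge]
        have hTmid : T ≤ midOf left right := by
          have := lt_of_served times hpos hT0 hge; omega
        apply ih
        · omega
        · exact hl
        · omega
        · right
          refine ⟨?_, ?_⟩
          · by_cases ha : answer = -1
            · rw [if_pos ha]; omega
            · rcases hinv with ⟨ha', _⟩ | ⟨ha', _⟩
              · exact absurd ha' ha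
              · rw [if_neg ha]
                have : midOf left right ≤ answer := by omega
                omega
          · have heq : (if answer = -1 then midOf left right else min answer (midOf left right))
                = midOf left right := by
              by_cases ha : answer = -1
              · rw [if_pos ha]
              · rcases hinv with ⟨ha', _⟩ | ⟨ha', _⟩
                · exact absurd ha' ha
                · rw [if_neg ha]
                  omega
            rw [heq]
            exact hge
      · rw [if_neg hge]
        have hmidT : midOf left right < T := by
          have := lt_of_served times hpos (show served times (midOf left right) < n by omega) hT1
          omega
        apply ih
        · omega
        · omega
        · exact hr
        · exact hinv
    · rw [dif_neg hlr]
      rcases hinv with ⟨_, hTr⟩ | ⟨ha, _⟩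
      · omega
      · omega

-- ===== VERDICT (by name: the statements are the Claim_ definitions above) =====
theorem solution_spec : Claim_equal_solution := by
  intro n times _hdom hpre
  obtain ⟨hne, hcase⟩ := hpre
  unfold Spec_solution
  obtain ⟨mx, hmx⟩ : ∃ mx, PySem.List.max? times (fun y => y) = some mx := by
    cases h : PySem.List.max? times (fun y => y) with
    | none => exact absurd ((PySem.List.max?_eq_none_iff times (fun y => y)).mp h) hne
    | some m => exact ⟨m, rfl⟩
  by_cases hn : n ≤ 0
  · -- empty search range: A's loop never runs, B serves nobody
    have hmx0 : 0 ≤ mx := by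
      rcases hcase with hall | ⟨_, hm⟩
      · have := hall mx (PySem.List.max?_mem hmx); omega
      · rw [hmx] at hm; simpa using hm
    have hrng : mx * n ≤ 0 := mul_nonpos_of_nonneg_of_nonpos hmx0 hn
    have hA : solution n times = -1 := by
      unfold solution
      rw [hmx]
      simp only [Option.getD_some]
      rw [solLoopA, dif_neg (show ¬ (1 : Int) ≤ mx * n by omega)]
    have hB : solution_alt n times = -1 := by
      unfold solution_alt
      rw [show n.toNat = 0 by omega]
      rfl
    rw [hA, hB]
  · have hn1 : 1 ≤ n := by omega
    have hpos : ∀ x ∈ times, 1 ≤ x := by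
      rcases hcase with h | ⟨h, _⟩
      · exact h
      · exact absurd h (by omega)
    have hmem : mx ∈ times := PySem.List.max?_mem hmx
    have hmx1 : 1 ≤ mx := hpos mx hmem
    obtain ⟨h2, hinv⟩ :=
      popLoop_inv times hpos hne n.toNat (buildHeap times) (-1) 0 (invS_init times hpos)
    simp only [Nat.zero_add] at hinv
    obtain ⟨hge, hltb, hT1⟩ := invS_extract times hpos hinv (by omega)
    have hcast : ((n.toNat : Nat) : Int) = n := by omega
    rw [hcast] at hge hltb
    have hTle : popLoop n.toNat (buildHeap times) (-1) ≤ mx * n := by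
      have hhi := served_hi times hpos hn1 hmem
      have := lt_of_served times hpos hltb hhi
      omega
    have hA : solution n times = popLoop n.toNat (buildHeap times) (-1) := by
      unfold solution
      rw [hmx]
      simp only [Option.getD_some]
      exact loopA_eq n times hpos _ hge hltb (mx * n + 1 - 1).toNat 1 (mx * n) (-1)
        (by omega) hT1 (by omega) (Or.inl ⟨rfl, hTle⟩)
    rw [hA]
    rfl
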